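-- pv_equiv track=rewrite | github.com/ShubhamKumaR-96/DSA_Leetcode | prefixSum2/maxMinInSubArr.py | minMaxValue
-- ===== SOURCE A (Python) =====
-- def minMaxValue(A):
--     n=len(A)
--
--     maxEle=max(A)
--     minEle=min(A)
--     ans=n
--
--     for i in range(n):
--         if A[i]==maxEle:
--             for j in range(i,n):
--                 if A[j]==minEle:
--                     ans=min(ans,j-i+1)
--
--         if A[i]==minEle:
--             for j in range(i,n):
--                 if A[j]==maxEle:
--                     ans=min(ans,j-i+1)
--     return ans
-- ===== SOURCE B (Python) =====
-- def minMaxValue(A):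
--     n = len(A)
--     mx = max(A)
--     mn = min(A)
--     ans = n
--     li = lj = -1
--     for k, x in enumerate(A):
--         if x == mx:
--             li = k
--             if lj >= 0:
--                 ans = min(ans, k - lj + 1)
--         if x == mn:
--             lj = k
--             if li >= 0:
--                 ans = min(ans, k - li + 1)
--     return ans
-- ===== Notes on version B (the rewrite author's own statement) =====
-- stated objective: faster
-- what changed: Replaced the quadratic double scan (for every max/min position rescan the rest of the array) by a single pass that tracks the last seen indices of the max and min and updates the best window length at each step.
import Mathlib
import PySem

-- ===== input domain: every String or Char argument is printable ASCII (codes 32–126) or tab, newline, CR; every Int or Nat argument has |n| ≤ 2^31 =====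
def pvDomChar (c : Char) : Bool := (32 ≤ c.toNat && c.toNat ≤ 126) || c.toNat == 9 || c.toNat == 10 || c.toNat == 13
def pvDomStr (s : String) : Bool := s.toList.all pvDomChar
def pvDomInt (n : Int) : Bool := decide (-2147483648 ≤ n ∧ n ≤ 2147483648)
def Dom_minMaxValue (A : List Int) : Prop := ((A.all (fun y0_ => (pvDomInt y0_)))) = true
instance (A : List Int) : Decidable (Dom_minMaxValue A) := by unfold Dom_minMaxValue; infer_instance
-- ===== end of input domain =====

-- B replaces A's quadratic double scan by a single pass tracking the last seen
-- indices of the max and of the min (objective: faster, O(n) instead of O(n^2)).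

-- ===== PORT A =====
-- Python A[i]/A[j] is always in range here (0 ≤ i,j < len(A)), so pyGetD with
-- default 0 is exact on every index the loops visit.
def minMaxValue (A : List Int) : Int :=
  let n : Int := A.length
  let maxEle : Int := (PySem.List.max? A (fun y => y)).getD 0  -- max(A); raises on []: excluded by Pre_
  let minEle : Int := (PySem.List.min? A (fun y => y)).getD 0  -- min(A); raises on []: excluded by Pre_
  let ans : Int := n
  (PySem.List.pyRange 0 n 1).foldl (fun ans i =>
    let ans := if PySem.List.pyGetD A i 0 = maxEle then
      (PySem.List.pyRange i n 1).foldl (fun ans j =>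
        if PySem.List.pyGetD A j 0 = minEle then min ans (j - i + 1) else ans) ans
    else ans
    if PySem.List.pyGetD A i 0 = minEle then
      (PySem.List.pyRange i n 1).foldl (fun ans j =>
        if PySem.List.pyGetD A j 0 = maxEle then min ans (j - i + 1) else ans) ans
    else ans) ans

-- ===== PORT B =====
def minMaxValue_alt (A : List Int) : Int :=
  let n : Int := A.length
  let mx : Int := (PySem.List.max? A (fun y => y)).getD 0  -- max(A); raises on []: excluded by Pre_
  let mn : Int := (PySem.List.min? A (fun y => y)).getD 0  -- min(A); raises on []: excluded by Pre_
  let st := (PySem.List.enumerate A 0).foldl (fun (st : Int × Int × Int) kx =>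
    let li := st.1
    let lj := st.2.1
    let ans := st.2.2
    let k := kx.1
    let x := kx.2
    let li := if x = mx then k else li
    let ans := if x = mx ∧ 0 ≤ lj then min ans (k - lj + 1) else ans
    let lj := if x = mn then k else lj
    let ans := if x = mn ∧ 0 ≤ li then min ans (k - li + 1) else ans
    (li, lj, ans)) (-1, -1, n)
  st.2.2

-- ===== PRECONDITION & SPEC =====
-- Pre_ excludes only the empty list, on which Python's max(A) raises ValueError.
def Pre_minMaxValue (A : List Int) : Prop := A ≠ []
instance (A : List Int) : Decidable (Pre_minMaxValue A) := by unfold Pre_minMaxValue; infer_instance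
def pvWitness_minMaxValue : List Int := [3, 1, 2]
def Spec_minMaxValue (A : List Int) (out : Int) : Prop := out = minMaxValue_alt A
instance (A : List Int) (out : Int) : Decidable (Spec_minMaxValue A out) := by unfold Spec_minMaxValue; infer_instance

-- ===== CLAIM (what is proved, stated in full; the proofs are below) =====
def Claim_equal_minMaxValue : Prop := ∀ (A : List Int), Dom_minMaxValue A → Pre_minMaxValue A → Spec_minMaxValue A (minMaxValue A)

-- ===== LEMMAS AND PROOFS =====

-- structural form of A's inner loop: scan the suffix s, counter c = j - i + 1
def scanMin (v : Int) (c : Int) (s : List Int) (a : Int) : Int :=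
  match s with
  | [] => a
  | x :: t => scanMin v (c + 1) t (if x = v then min a c else a)

-- structural form of A's outer loop
def outA (mx mn : Int) (s : List Int) (a : Int) : Int :=
  match s with
  | [] => a
  | x :: t =>
    outA mx mn t
      (if x = mn then scanMin mx 1 (x :: t) (if x = mx then scanMin mn 1 (x :: t) a else a)
       else (if x = mx then scanMin mn 1 (x :: t) a else a))

-- structural form of B's loop
def outB (mx mn : Int) (k li lj a : Int) (s : List Int) : Int :=
  match s with
  | [] => a
  | x :: t =>
    outB mx mn (k + 1)
      (if x = mx then k else li)
      (if x = mn then k else lj)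
      (if x = mn ∧ 0 ≤ (if x = mx then k else li) then
         min (if x = mx ∧ 0 ≤ lj then min a (k - lj + 1) else a)
             (k - (if x = mx then k else li) + 1)
       else (if x = mx ∧ 0 ≤ lj then min a (k - lj + 1) else a)) t

-- a (mx,mn)-pair of positions i ≤ j in s, the windows A's loops consider
def pairCond (mx mn : Int) (s : List Int) (i j : Nat) : Prop :=
  (s[i]? = some mx ∧ s[j]? = some mn) ∨ (s[i]? = some mn ∧ s[j]? = some mx)

theorem scanMin_le_init (v : Int) : ∀ (s : List Int) (c a : Int), scanMin v c s a ≤ a := by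
  intro s
  induction s with
  | nil => intro c a; simp [scanMin]
  | cons x t ih =>
    intro c a
    simp only [scanMin]
    refine le_trans (ih (c + 1) _) ?_
    split
    · exact min_le_left _ _
    · exact le_rfl

theorem scanMin_le_hit (v : Int) : ∀ (s : List Int) (c a : Int) (j : Nat),
    s[j]? = some v → scanMin v c s a ≤ c + j := by
  intro s
  induction s with
  | nil => intro c a j h; simp at h
  | cons x t ih =>
    intro c a j h
    simp only [scanMin]
    cases j with
    | zero =>
      have hx : x = v := by simpa using h
      have h1 := scanMin_le_init v t (c + 1) (if x = v then min a c else a)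
      have h2 : (if x = v then min a c else a) ≤ c := by
        rw [if_pos hx]; exact min_le_right _ _
      simpa using le_trans h1 h2
    | succ j =>
      have h' : t[j]? = some v := by simpa using h
      refine le_trans (ih (c + 1) _ j h') ?_
      push_cast
      omega

theorem scanMin_ge (v z : Int) : ∀ (s : List Int) (c a : Int),
    z ≤ a → (∀ j : Nat, s[j]? = some v → z ≤ c + j) → z ≤ scanMin v c s a := by
  intro s
  induction s with
  | nil => intro c a hz _; simpa [scanMin]
  | cons x t ih =>
    intro c a hz hh
    simp only [scanMin]
    refine ih (c + 1) _ ?_ ?_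
    · split
      · next hx =>
        refine le_min hz ?_
        simpa using hh 0 (by simp [hx])
      · exact hz
    · intro j hj
      have := hh (j + 1) (by simpa using hj)
      push_cast at this ⊢
      omega

theorem outA_le_init (mx mn : Int) : ∀ (s : List Int) (a : Int), outA mx mn s a ≤ a := by
  intro s
  induction s with
  | nil => intro a; simp [outA]
  | cons x t ih =>
    intro a
    simp only [outA]
    set a1 := (if x = mx then scanMin mn 1 (x :: t) a else a) with ha1
    have h1 : a1 ≤ a := by
      rw [ha1]; split
      · exact scanMin_le_init _ _ _ _
      · exact le_rfl
    have h2 : (if x = mn then scanMin mx 1 (x :: t) a1 else a1) ≤ a1 := by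
      split
      · exact scanMin_le_init _ _ _ _
      · exact le_rfl
    exact le_trans (ih _) (le_trans h2 h1)

theorem pairCond_shift (mx mn x : Int) (t : List Int) (i j : Nat)
    (h : pairCond mx mn t i j) : pairCond mx mn (x :: t) (i + 1) (j + 1) := by
  rcases h with ⟨h1, h2⟩ | ⟨h1, h2⟩
  · exact Or.inl ⟨by simpa using h1, by simpa using h2⟩
  · exact Or.inr ⟨by simpa using h1, by simpa using h2⟩

theorem pairCond_unshift (mx mn x : Int) (t : List Int) (i j : Nat)
    (h : pairCond mx mn (x :: t) (i + 1) (j + 1)) : pairCond mx mn t i j := by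
  rcases h with ⟨h1, h2⟩ | ⟨h1, h2⟩
  · exact Or.inl ⟨by simpa using h1, by simpa using h2⟩
  · exact Or.inr ⟨by simpa using h1, by simpa using h2⟩

theorem outA_le_pair (mx mn : Int) : ∀ (s : List Int) (a : Int) (i j : Nat),
    i ≤ j → pairCond mx mn s i j → outA mx mn s a ≤ (j : Int) - i + 1 := by
  intro s
  induction s with
  | nil => intro a i j _ h; rcases h with ⟨h, _⟩ | ⟨h, _⟩ <;> simp at h
  | cons x t ih =>
    intro a i j hij hp
    cases i with
    | zero =>
      simp only [outA]
      set a1 := (if x = mx then scanMin mn 1 (x :: t) a else a) with ha1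
      rcases hp with ⟨hx, hj⟩ | ⟨hx, hj⟩
      · have hx' : x = mx := by simpa using hx
        have h1 : a1 ≤ (j : Int) + 1 := by
          rw [ha1, if_pos hx']
          have := scanMin_le_hit mn (x :: t) 1 a j hj
          omega
        have h2 : (if x = mn then scanMin mx 1 (x :: t) a1 else a1) ≤ (j : Int) + 1 := by
          split
          · exact le_trans (scanMin_le_init _ _ _ _) h1
          · exact h1
        have h3 := le_trans (outA_le_init mx mn t _) h2
        push_cast
        omega
      · have hx' : x = mn := by simpa using hx
        have h2 : (if x = mn then scanMin mx 1 (x :: t) a1 else a1) ≤ (j : Int) + 1 := by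
          rw [if_pos hx']
          have := scanMin_le_hit mx (x :: t) 1 a1 j hj
          omega
        have h3 := le_trans (outA_le_init mx mn t _) h2
        push_cast
        omega
    | succ i =>
      cases j with
      | zero => omega
      | succ j =>
        simp only [outA]
        refine le_trans (ih _ i j (by omega) (pairCond_unshift mx mn x t i j hp)) ?_
        push_cast
        omega

theorem outA_ge (mx mn z : Int) : ∀ (s : List Int) (a : Int),
    z ≤ a → (∀ i j : Nat, i ≤ j → pairCond mx mn s i j → z ≤ (j : Int) - i + 1) →
    z ≤ outA mx mn s a := by
  intro s
  induction s with
  | nil => intro a hz _; simpa [outA]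
  | cons x t ih =>
    intro a hz hp
    simp only [outA]
    set a1 := (if x = mx then scanMin mn 1 (x :: t) a else a) with ha1
    have hz1 : z ≤ a1 := by
      rw [ha1]
      split
      · next hx =>
        refine scanMin_ge mn z (x :: t) 1 a hz ?_
        intro j hj
        have := hp 0 j (by omega) (Or.inl ⟨by simp [hx], hj⟩)
        push_cast at this ⊢
        omega
      · exact hz
    have hz2 : z ≤ (if x = mn then scanMin mx 1 (x :: t) a1 else a1) := by
      split
      · next hx =>
        refine scanMin_ge mx z (x :: t) 1 a1 hz1 ?_
        intro j hj
        have := hp 0 j (by omega) (Or.inr ⟨by simp [hx], hj⟩)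
        push_cast at this ⊢
        omega
      · exact hz1
    refine ih _ hz2 ?_
    intro i j hij hp'
    have := hp (i + 1) (j + 1) (by omega) (pairCond_shift mx mn x t i j hp')
    push_cast at this ⊢
    omega

theorem outB_le_init (mx mn : Int) : ∀ (s : List Int) (k li lj a : Int),
    outB mx mn k li lj a s ≤ a := by
  intro s
  induction s with
  | nil => intro k li lj a; simp [outB]
  | cons x t ih =>
    intro k li lj a
    simp only [outB]
    set li' := (if x = mx then k else li) with hli'
    set a1 := (if x = mx ∧ 0 ≤ lj then min a (k - lj + 1) else a) with ha1
    have h1 : a1 ≤ a := by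
      rw [ha1]; split
      · exact min_le_left _ _
      · exact le_rfl
    have h2 : (if x = mn ∧ 0 ≤ li' then min a1 (k - li' + 1) else a1) ≤ a1 := by
      split
      · exact min_le_left _ _
      · exact le_rfl
    exact le_trans (ih _ _ _ _) (le_trans h2 h1)

theorem outB_aux_mn (mx mn : Int) : ∀ (s : List Int) (k li lj a : Int) (j : Nat),
    0 ≤ li → li ≤ k → s[j]? = some mn →
    outB mx mn k li lj a s ≤ k + j - li + 1 := by
  intro s
  induction s with
  | nil => intro k li lj a j _ _ h; simp at h
  | cons x t ih =>
    intro k li lj a j hli hlik hj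
    simp only [outB]
    set li' := (if x = mx then k else li) with hli'
    set a1 := (if x = mx ∧ 0 ≤ lj then min a (k - lj + 1) else a) with ha1
    have hfacts : li ≤ li' ∧ 0 ≤ li' ∧ li' ≤ k := by
      rw [hli']; split <;> omega
    cases j with
    | zero =>
      have hx : x = mn := by simpa using hj
      have hcond : x = mn ∧ 0 ≤ li' := ⟨hx, hfacts.2.1⟩
      rw [if_pos hcond]
      refine le_trans (outB_le_init mx mn t _ _ _ _) ?_
      have := min_le_right a1 (k - li' + 1)
      push_cast
      omega
    | succ j =>
      have hj' : t[j]? = some mn := by simpa using hj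
      refine le_trans (ih (k + 1) li' (if x = mn then k else lj) _ j hfacts.2.1 (by omega) hj') ?_
      push_cast
      omega

theorem outB_aux_mx (mx mn : Int) : ∀ (s : List Int) (k li lj a : Int) (j : Nat),
    0 ≤ lj → lj ≤ k → s[j]? = some mx →
    outB mx mn k li lj a s ≤ k + j - lj + 1 := by
  intro s
  induction s with
  | nil => intro k li lj a j _ _ h; simp at h
  | cons x t ih =>
    intro k li lj a j hlj hljk hj
    simp only [outB]
    set li' := (if x = mx then k else li) with hli'
    set lj' := (if x = mn then k else lj) with hlj2
    set a1 := (if x = mx ∧ 0 ≤ lj then min a (k - lj + 1) else a) with ha1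
    have hfacts : lj ≤ lj' ∧ 0 ≤ lj' ∧ lj' ≤ k := by
      rw [hlj2]; split <;> omega
    cases j with
    | zero =>
      have hx : x = mx := by simpa using hj
      have h1 : a1 ≤ k - lj + 1 := by
        have hcond : x = mx ∧ 0 ≤ lj := ⟨hx, hlj⟩
        rw [ha1, if_pos hcond]; exact min_le_right _ _
      have h2 : (if x = mn ∧ 0 ≤ li' then min a1 (k - li' + 1) else a1) ≤ a1 := by
        split
        · exact min_le_left _ _
        · exact le_rfl
      refine le_trans (outB_le_init mx mn t _ _ _ _) ?_
      push_cast
      omega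
    | succ j =>
      have hj' : t[j]? = some mx := by simpa using hj
      refine le_trans (ih (k + 1) li' lj' _ j hfacts.2.1 (by omega) hj') ?_
      push_cast
      omega

theorem outB_le_pair (mx mn : Int) : ∀ (s : List Int) (k li lj a : Int) (i j : Nat),
    0 ≤ k → i ≤ j → pairCond mx mn s i j →
    outB mx mn k li lj a s ≤ (j : Int) - i + 1 := by
  intro s
  induction s with
  | nil => intro k li lj a i j _ _ h; rcases h with ⟨h, _⟩ | ⟨h, _⟩ <;> simp at h
  | cons x t ih =>
    intro k li lj a i j hk hij hp
    cases i with
    | zero =>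
      cases j with
      | zero =>
        have hxmx : x = mx := by
          rcases hp with ⟨h1, _⟩ | ⟨_, h2⟩
          · simpa using h1
          · simpa using h2
        have hxmn : x = mn := by
          rcases hp with ⟨_, h2⟩ | ⟨h1, _⟩
          · simpa using h2
          · simpa using h1
        simp only [outB]
        set li' := (if x = mx then k else li) with hli'
        set a1 := (if x = mx ∧ 0 ≤ lj then min a (k - lj + 1) else a) with ha1
        have hli0 : li' = k := by rw [hli', if_pos hxmx]
        have hcond : x = mn ∧ 0 ≤ li' := ⟨hxmn, by omega⟩
        rw [if_pos hcond]
        refine le_trans (outB_le_init mx mn t _ _ _ _) ?_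
        have := min_le_right a1 (k - li' + 1)
        push_cast
        omega
      | succ j =>
        rcases hp with ⟨h1, h2⟩ | ⟨h1, h2⟩
        · have hxmx : x = mx := by simpa using h1
          have hj' : t[j]? = some mn := by simpa using h2
          simp only [outB]
          set li' := (if x = mx then k else li) with hli'
          have hli0 : li' = k := by rw [hli', if_pos hxmx]
          refine le_trans (outB_aux_mn mx mn t (k + 1) li' _ _ j (by omega) (by omega) hj') ?_
          push_cast
          omega
        · have hxmn : x = mn := by simpa using h1
          have hj' : t[j]? = some mx := by simpa using h2
          simp only [outB]
          set lj' := (if x = mn then k else lj) with hlj2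
          have hlj0 : lj' = k := by rw [hlj2, if_pos hxmn]
          refine le_trans (outB_aux_mx mx mn t (k + 1) _ lj' _ j (by omega) (by omega) hj') ?_
          push_cast
          omega
    | succ i =>
      cases j with
      | zero => omega
      | succ j =>
        simp only [outB]
        refine le_trans (ih (k + 1) _ _ _ i j (by omega) (by omega) (pairCond_unshift mx mn x t i j hp)) ?_
        push_cast
        omega

theorem outB_ge (mx mn z : Int) : ∀ (s : List Int) (k li lj a : Int),
    z ≤ a →
    (∀ i j : Nat, i ≤ j → pairCond mx mn s i j → z ≤ (j : Int) - i + 1) →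
    (0 ≤ li → ∀ j : Nat, s[j]? = some mn → z ≤ k + j - li + 1) →
    (0 ≤ lj → ∀ j : Nat, s[j]? = some mx → z ≤ k + j - lj + 1) →
    z ≤ outB mx mn k li lj a s := by
  intro s
  induction s with
  | nil => intro k li lj a hz _ _ _; simpa [outB]
  | cons x t ih =>
    intro k li lj a hz hp hmn hmx
    simp only [outB]
    set li' := (if x = mx then k else li) with hli'
    set lj' := (if x = mn then k else lj) with hlj2
    set a1 := (if x = mx ∧ 0 ≤ lj then min a (k - lj + 1) else a) with ha1
    have hz1 : z ≤ a1 := by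
      rw [ha1]
      split
      · next h =>
        refine le_min hz ?_
        have := hmx h.2 0 (by simp [h.1])
        push_cast at this
        omega
      · exact hz
    have hz2 : z ≤ (if x = mn ∧ 0 ≤ li' then min a1 (k - li' + 1) else a1) := by
      split
      · next h =>
        refine le_min hz1 ?_
        by_cases hxmx : x = mx
        · have hk' : li' = k := by rw [hli', if_pos hxmx]
          have := hp 0 0 le_rfl (Or.inl ⟨by simp [hxmx], by simp [h.1]⟩)
          push_cast at this
          omega
        · have hk' : li' = li := by rw [hli', if_neg hxmx]
          have h0 : 0 ≤ li := by rw [hk'] at h; exact h.2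
          have := hmn h0 0 (by simp [h.1])
          push_cast at this
          omega
      · exact hz1
    refine ih (k + 1) li' lj' _ hz2 ?_ ?_ ?_
    · intro i j hij hp'
      have := hp (i + 1) (j + 1) (by omega) (pairCond_shift mx mn x t i j hp')
      push_cast at this ⊢
      omega
    · intro hli0 j hj
      by_cases hxmx : x = mx
      · have hk' : li' = k := by rw [hli', if_pos hxmx]
        have := hp 0 (j + 1) (by omega) (Or.inl ⟨by simp [hxmx], by simpa using hj⟩)
        push_cast at this ⊢
        omega
      · have hk' : li' = li := by rw [hli', if_neg hxmx]
        have h0 : 0 ≤ li := by rw [hk'] at hli0; exact hli0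
        have := hmn h0 (j + 1) (by simpa using hj)
        push_cast at this ⊢
        omega
    · intro hlj0 j hj
      by_cases hxmn : x = mn
      · have hk' : lj' = k := by rw [hlj2, if_pos hxmn]
        have := hp 0 (j + 1) (by omega) (Or.inr ⟨by simp [hxmn], by simpa using hj⟩)
        push_cast at this ⊢
        omega
      · have hk' : lj' = lj := by rw [hlj2, if_neg hxmn]
        have h0 : 0 ≤ lj := by rw [hk'] at hlj0; exact hlj0
        have := hmx h0 (j + 1) (by simpa using hj)
        push_cast at this ⊢
        omega

-- the heart of the equivalence: both loop skeletons compute the same value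
theorem outA_eq_outB (mx mn : Int) (s : List Int) (n : Int) :
    outA mx mn s n = outB mx mn 0 (-1) (-1) n s := by
  refine le_antisymm ?_ ?_
  · refine outB_ge mx mn _ s 0 (-1) (-1) n (outA_le_init mx mn s n) ?_ ?_ ?_
    · intro i j hij hp; exact outA_le_pair mx mn s n i j hij hp
    · intro h; omega
    · intro h; omega
  · refine outA_ge mx mn _ s n (outB_le_init mx mn s 0 (-1) (-1) n) ?_
    intro i j hij hp
    exact outB_le_pair mx mn s 0 (-1) (-1) n i j le_rfl hij hp

-- ===== bridges: the ports unfold to the loop skeletons =====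

theorem drop_head_eq (A : List Int) (i : Int) (x : Int) (t : List Int)
    (hi : 0 ≤ i) (hd : A.drop i.toNat = x :: t) :
    PySem.List.pyGetD A i 0 = x ∧ A.drop (i + 1).toNat = t ∧ i < (A.length : Int) := by
  have hlt : i.toNat < A.length := by
    by_contra h
    rw [List.drop_eq_nil_of_le (by omega)] at hd
    simp at hd
  have hilt : i < (A.length : Int) := by omega
  refine ⟨?_, ?_, hilt⟩
  · rw [PySem.List.pyGetD_eq_getElem A 0 hi hilt]
    have h1 : A[i.toNat]? = some x := by
      rw [← List.head?_drop, hd]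
      rfl
    rw [List.getElem?_eq_getElem hlt] at h1
    exact Option.some.inj h1
  · have h2 : List.drop 1 (A.drop i.toNat) = A.drop (i.toNat + 1) := by
      rw [List.drop_drop]
    rw [show (i + 1).toNat = i.toNat + 1 from by omega, ← h2, hd]
    rfl

theorem bridge_inner (A : List Int) (v i0 : Int) :
    ∀ (s : List Int) (i a : Int), 0 ≤ i → A.drop i.toNat = s →
    (PySem.List.pyRange i (A.length) 1).foldl
      (fun a j => if PySem.List.pyGetD A j 0 = v then min a (j - i0 + 1) else a) a
    = scanMin v (i - i0 + 1) s a := by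
  intro s
  induction s with
  | nil =>
    intro i a hi hd
    have hlen : A.length ≤ i.toNat := List.drop_eq_nil_iff.mp hd
    rw [PySem.List.pyRange_one_eq_nil (by omega)]
    simp [scanMin]
  | cons x t ih =>
    intro i a hi hd
    obtain ⟨hget, hd', hilt⟩ := drop_head_eq A i x t hi hd
    rw [PySem.List.pyRange_one_cons hilt, List.foldl_cons]
    rw [ih (i + 1) _ (by omega) hd']
    rw [show i + 1 - i0 + 1 = i - i0 + 1 + 1 from by omega]
    simp only [scanMin, hget]

theorem bridge_outer (A : List Int) (mx mn : Int) :
    ∀ (s : List Int) (i a : Int), 0 ≤ i → A.drop i.toNat = s →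
    (PySem.List.pyRange i (A.length) 1).foldl (fun ans i =>
      if PySem.List.pyGetD A i 0 = mn then
        (PySem.List.pyRange i (A.length) 1).foldl (fun ans j =>
          if PySem.List.pyGetD A j 0 = mx then min ans (j - i + 1) else ans)
          (if PySem.List.pyGetD A i 0 = mx then
            (PySem.List.pyRange i (A.length) 1).foldl (fun ans j =>
              if PySem.List.pyGetD A j 0 = mn then min ans (j - i + 1) else ans) ans
          else ans)
      else
        (if PySem.List.pyGetD A i 0 = mx then
          (PySem.List.pyRange i (A.length) 1).foldl (fun ans j =>
            if PySem.List.pyGetD A j 0 = mn then min ans (j - i + 1) else ans) ans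
        else ans)) a
    = outA mx mn s a := by
  intro s
  induction s with
  | nil =>
    intro i a hi hd
    have hlen : A.length ≤ i.toNat := List.drop_eq_nil_iff.mp hd
    rw [PySem.List.pyRange_one_eq_nil (by omega)]
    simp [outA]
  | cons x t ih =>
    intro i a hi hd
    obtain ⟨hget, hd', hilt⟩ := drop_head_eq A i x t hi hd
    rw [PySem.List.pyRange_one_cons hilt, List.foldl_cons]
    rw [ih (i + 1) _ (by omega) hd']
    simp only [outA, hget]
    congr 1
    rw [bridge_inner A mn i (x :: t) i a hi hd, bridge_inner A mx i (x :: t) i _ hi hd]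
    have hc : i - i + 1 = (1 : Int) := by omega
    rw [hc]

theorem bridge_B (mx mn : Int) :
    ∀ (s : List Int) (k li lj a : Int),
    ((PySem.List.enumerate s k).foldl (fun (st : Int × Int × Int) kx =>
      ((if kx.2 = mx then kx.1 else st.1),
       (if kx.2 = mn then kx.1 else st.2.1),
       (if kx.2 = mn ∧ 0 ≤ (if kx.2 = mx then kx.1 else st.1) then
          min (if kx.2 = mx ∧ 0 ≤ st.2.1 then min st.2.2 (kx.1 - st.2.1 + 1) else st.2.2)
              (kx.1 - (if kx.2 = mx then kx.1 else st.1) + 1)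
        else (if kx.2 = mx ∧ 0 ≤ st.2.1 then min st.2.2 (kx.1 - st.2.1 + 1) else st.2.2))))
      (li, lj, a)).2.2
    = outB mx mn k li lj a s := by
  intro s
  induction s with
  | nil => intro k li lj a; simp [PySem.List.enumerate_nil, outB]
  | cons x t ih =>
    intro k li lj a
    rw [PySem.List.enumerate_cons, List.foldl_cons]
    simp only [outB]
    exact ih (k + 1) _ _ _

-- ===== VERDICT (by name: the statement is the Claim_ definition above) =====
theorem minMaxValue_spec : Claim_equal_minMaxValue := by
  intro A _ _
  unfold Spec_minMaxValue
  simp only [minMaxValue, minMaxValue_alt]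
  rw [bridge_outer A ((PySem.List.max? A (fun y => y)).getD 0)
      ((PySem.List.min? A (fun y => y)).getD 0) A 0 ((A.length : Int)) le_rfl (by simp)]
  rw [bridge_B ((PySem.List.max? A (fun y => y)).getD 0)
      ((PySem.List.min? A (fun y => y)).getD 0) A 0 (-1) (-1) ((A.length : Int))]
  exact outA_eq_outB _ _ A _
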